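-- pv_equiv track=rewrite | github.com/aaronbittel/advent-of-code | 2025/day2/day2.py | repeated_part2
-- ===== SOURCE A (Python) =====
-- def repeated_part2(s: str) -> bool:
--     for i in range(1, (len(s) // 2) + 1):
--         pattern = s[:i]
--         l_pattern = len(pattern)
--         if len(s) % l_pattern != 0:
--             continue
--         for j in range(1, len(s) // l_pattern):
--             test = s[j * l_pattern : (j + 1) * l_pattern]
--             if pattern != test:
--                 break
--         else:
--             return True
--     return False
-- ===== SOURCE B (Python) =====
-- def repeated_part2(s: str) -> bool:
--     return len(s) > 0 and s in (s + s)[1:-1]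
-- ===== Notes on version B (the rewrite author's own statement) =====
-- stated objective: faster
-- what changed: Replaces the divisor-enumerating chunk-comparison double loop by the classic string-doubling period test: s is a repetition of a shorter pattern iff s occurs inside (s+s)[1:-1], one substring search.
import Mathlib
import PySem

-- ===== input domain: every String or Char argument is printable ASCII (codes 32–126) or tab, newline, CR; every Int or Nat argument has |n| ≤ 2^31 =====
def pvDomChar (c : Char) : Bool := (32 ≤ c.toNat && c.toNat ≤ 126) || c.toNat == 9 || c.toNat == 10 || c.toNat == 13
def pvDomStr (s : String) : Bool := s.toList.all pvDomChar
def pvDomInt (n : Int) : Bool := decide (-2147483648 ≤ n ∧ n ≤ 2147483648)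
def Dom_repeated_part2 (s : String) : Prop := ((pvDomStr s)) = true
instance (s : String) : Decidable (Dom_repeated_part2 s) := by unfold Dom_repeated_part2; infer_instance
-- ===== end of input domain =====

-- B replaces A's divisor-enumerating chunk-comparison double loop by the classic
-- string-doubling period test (s occurs in (s+s)[1:-1]); same return value, one substring search.

-- ===== PORT A =====
def repeated_part2 (s : String) : Bool :=
  let cs := s.toList
  let n : Int := (cs.length : Int)
  (PySem.List.pyRange 1 (PySem.Int.floordiv n 2 + 1) 1).any (fun i =>
    let pattern := PySem.List.slice cs none (some i)
    let lp : Int := (pattern.length : Int)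
    if PySem.Int.mod n lp ≠ 0 then false
    else
      (PySem.List.pyRange 1 (PySem.Int.floordiv n lp) 1).all (fun j =>
        pattern == PySem.List.slice cs (some (j * lp)) (some ((j + 1) * lp))))

-- ===== PORT B =====
def repeated_part2_alt (s : String) : Bool :=
  let cs := s.toList
  let doubled := cs ++ cs
  decide ((0 : Int) < (cs.length : Int)) &&
    PySem.Chars.isIn cs (PySem.List.slice doubled (some 1) (some (-1)))

-- ===== PRECONDITION & SPEC =====
def Spec_repeated_part2 (s : String) (out : Bool) : Prop := out = repeated_part2_alt s
instance (s : String) (out : Bool) : Decidable (Spec_repeated_part2 s out) := by unfold Spec_repeated_part2; infer_instance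

-- ===== CLAIM (what is proved, stated in full; the proofs are below) =====
def Claim_equal_repeated_part2 : Prop := ∀ (s : String), Dom_repeated_part2 s → Spec_repeated_part2 s (repeated_part2 s)

-- ===== LEMMAS AND PROOFS =====

/-- `A`'s inner for/else at pattern length `i`: every later chunk equals the first chunk. -/
def chunksEq (cs : List Char) (i : Nat) : Prop :=
  ∀ j : Nat, 1 ≤ j → j < cs.length / i → (cs.drop (j * i)).take i = cs.take i

lemma rotate_mul_self {α : Type} (l : List α) (k : ℕ) (h : l.rotate k = l) :
    ∀ a : ℕ, l.rotate (a * k) = l := by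
  intro a
  induction a with
  | zero => simp
  | succ a ih =>
    have := List.rotate_rotate l (a * k) k
    rw [ih, h] at this
    rw [Nat.succ_mul, ← this]

lemma rotate_gcd {α : Type} (l : List α) (k : ℕ) (hk1 : 1 ≤ k) (hk2 : k < l.length)
    (h : l.rotate k = l) : l.rotate (Nat.gcd k l.length) = l := by
  have hg : Nat.gcd k l.length < l.length := by
    have h1 := Nat.gcd_le_left (m := k) (n := l.length) hk1
    omega
  obtain ⟨m, hm, hmod⟩ := Nat.exists_mul_mod_eq_gcd (n := k) (k := l.length) hg
  have h2 : l.rotate (k * m) = l := by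
    rw [Nat.mul_comm]; exact rotate_mul_self l k h m
  calc l.rotate (Nat.gcd k l.length) = l.rotate (k * m % l.length) := by rw [hmod]
    _ = l.rotate (k * m) := List.rotate_mod l (k * m)
    _ = l := h2

lemma chunks_of_rotate {cs : List Char} {i : ℕ} (hdvd : i ∣ cs.length)
    (h : cs.rotate i = cs) : chunksEq cs i := by
  intro j hj1 hj2
  have hji : (j + 1) * i ≤ cs.length := by
    have : j + 1 ≤ cs.length / i := hj2
    calc (j+1) * i ≤ (cs.length / i) * i := Nat.mul_le_mul_right i this
      _ = cs.length := Nat.div_mul_cancel hdvd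
  rw [add_mul, one_mul] at hji
  have hd : cs.drop (j * i) ++ cs.take (j * i) = cs := by
    rw [← List.rotate_eq_drop_append_take (by omega : j * i ≤ cs.length)]
    exact rotate_mul_self cs i h j
  have hlen : i ≤ (cs.drop (j * i)).length := by
    rw [List.length_drop]; omega
  calc (cs.drop (j * i)).take i = (cs.drop (j * i) ++ cs.take (j * i)).take i :=
        (List.take_append_of_le_length hlen).symm
    _ = cs.take i := by rw [hd]

lemma getElem?_mod_of_chunks {cs : List Char} {i : ℕ} (hi : 0 < i) (hdvd : i ∣ cs.length)
    (h : chunksEq cs i) : ∀ m, m < cs.length → cs[m]? = cs[m % i]? := by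
  intro m hm
  rcases Nat.eq_zero_or_pos (m / i) with hj | hj
  · rw [Nat.mod_eq_of_lt (Nat.lt_of_div_eq_zero hi hj)]
  · have hj2 : m / i < cs.length / i := Nat.div_lt_div_of_lt_of_dvd hdvd hm
    have hch := h (m / i) hj hj2
    have hr : m % i < i := Nat.mod_lt _ hi
    have key : cs[m / i * i + m % i]? = cs[m % i]? := by
      have := congrArg (fun l => l[m % i]?) hch
      simpa [List.getElem?_take_of_lt hr, List.getElem?_drop] using this
    have hm2 : m / i * i + m % i = m := by rw [Nat.mul_comm]; exact Nat.div_add_mod m i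
    calc cs[m]? = cs[m / i * i + m % i]? := by rw [hm2]
      _ = cs[m % i]? := key

lemma rotate_of_chunks {cs : List Char} {i : ℕ} (hi : 0 < i) (hdvd : i ∣ cs.length)
    (h : chunksEq cs i) : cs.rotate i = cs := by
  apply List.ext_getElem?
  intro m
  by_cases hm : m < cs.length
  · rw [List.getElem?_rotate hm]
    have h1 := getElem?_mod_of_chunks hi hdvd h ((m + i) % cs.length)
      (Nat.mod_lt _ (by omega))
    have h2 := getElem?_mod_of_chunks hi hdvd h m hm
    rw [h1, h2, Nat.mod_mod_of_dvd _ hdvd, Nat.add_mod_right]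
  · rw [List.getElem?_eq_none (by simpa using Nat.le_of_not_lt hm),
        List.getElem?_eq_none (Nat.le_of_not_lt hm)]

/-- The two existential readings of A and B agree: a repeating divisor pattern
exists iff the list equals one of its nontrivial rotations. -/
lemma bridge (cs : List Char) :
    (∃ i : ℕ, 1 ≤ i ∧ i ≤ cs.length / 2 ∧ i ∣ cs.length ∧ chunksEq cs i) ↔
      (∃ k : ℕ, 1 ≤ k ∧ k < cs.length ∧ cs.rotate k = cs) := by
  constructor
  · rintro ⟨i, h1, h2, h3, h4⟩
    refine ⟨i, h1, by omega, rotate_of_chunks h1 h3 h4⟩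
  · rintro ⟨k, h1, h2, h3⟩
    have hg1 : 1 ≤ Nat.gcd k cs.length := Nat.gcd_pos_of_pos_left _ h1
    have hgd : Nat.gcd k cs.length ∣ cs.length := Nat.gcd_dvd_right _ _
    have hgk : Nat.gcd k cs.length ≤ k := Nat.gcd_le_left _ h1
    have hg2 : Nat.gcd k cs.length ≤ cs.length / 2 := by
      obtain ⟨c, hc⟩ := hgd
      have hc2 : 2 ≤ c := by nlinarith
      have : 2 * Nat.gcd k cs.length ≤ cs.length := by nlinarith
      omega
    have hrot := rotate_gcd cs k h1 h2 h3
    exact ⟨Nat.gcd k cs.length, hg1, hg2, hgd, chunks_of_rotate hgd hrot⟩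

lemma chunk_slice (cs : List Char) (jt it : ℕ) :
    PySem.List.slice cs (some ((jt : Int) * (it : Int)))
      (some (((jt : Int) + 1) * (it : Int))) = (cs.drop (jt * it)).take it := by
  have h1 : ((jt : Int) * (it : Int)) = ((jt * it : Nat) : Int) := by push_cast; ring
  have h2 : (((jt : Int) + 1) * (it : Int)) = (((jt + 1) * it : Nat) : Int) := by push_cast; ring
  rw [h1, h2, PySem.List.slice_natCast]
  have h3 : (jt + 1) * it - jt * it = it := by
    rw [add_mul, one_mul]; omega
  rw [h3]

/-- A's loop body at pattern length `it` succeeds iff `it` divides the length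
and all chunks equal the first one. -/
lemma body_iff (cs : List Char) (it : ℕ) (h2 : it ≤ cs.length / 2) :
    ((fun i =>
      let pattern := PySem.List.slice cs none (some i)
      let lp : Int := (pattern.length : Int)
      if PySem.Int.mod (cs.length : Int) lp ≠ 0 then false
      else
        (PySem.List.pyRange 1 (PySem.Int.floordiv (cs.length : Int) lp) 1).all (fun j =>
          pattern == PySem.List.slice cs (some (j * lp)) (some ((j + 1) * lp))))
      ((it : Int)) = true)
    ↔ (it ∣ cs.length ∧ chunksEq cs it) := by
  have hit : it ≤ cs.length := le_trans h2 (Nat.div_le_self _ _)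
  have hpat : PySem.List.slice cs none (some (it : Int)) = cs.take it :=
    PySem.List.slice_to_natCast cs it
  have hlen : (cs.take it).length = it := by
    rw [List.length_take]; omega
  dsimp only
  rw [hpat, hlen, PySem.Int.mod_natCast]
  by_cases hdvd : it ∣ cs.length
  · have hz : cs.length % it = 0 := Nat.dvd_iff_mod_eq_zero.1 hdvd
    rw [hz]
    simp only [Nat.cast_zero, ne_eq, not_true_eq_false, if_false]
    rw [PySem.Int.floordiv_natCast]
    rw [List.all_eq_true]
    constructor
    · intro hall
      refine ⟨hdvd, ?_⟩
      intro jt hj1 hj2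
      have hmem : ((jt : Nat) : Int) ∈ PySem.List.pyRange 1 ((cs.length / it : Nat) : Int) 1 :=
        (PySem.List.mem_pyRange_one).2 ⟨by exact_mod_cast hj1, by exact_mod_cast hj2⟩
      have hb := hall _ hmem
      rw [chunk_slice cs jt it] at hb
      exact (beq_iff_eq.mp hb).symm
    · rintro ⟨-, hch⟩
      intro i hmem
      obtain ⟨hi1, hi2⟩ := (PySem.List.mem_pyRange_one).1 hmem
      have hi0 : i = ((i.toNat : Nat) : Int) := by omega
      rw [hi0, chunk_slice cs i.toNat it]
      exact beq_iff_eq.mpr ((hch i.toNat (by omega) (by omega)).symm)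
  · have hz : ((cs.length % it : Nat) : Int) ≠ 0 := by
      exact_mod_cast fun h => hdvd (Nat.dvd_iff_mod_eq_zero.2 (by exact_mod_cast h))
    rw [if_pos hz]
    simp [hdvd]

lemma a_iff (s : String) :
    repeated_part2 s = true ↔
      ∃ it : ℕ, 1 ≤ it ∧ it ≤ s.toList.length / 2 ∧ it ∣ s.toList.length ∧
        chunksEq s.toList it := by
  dsimp only [repeated_part2]
  rw [List.any_eq_true]
  have hfd : PySem.Int.floordiv ((s.toList.length : Nat) : Int) 2 =
      ((s.toList.length / 2 : Nat) : Int) := by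
    exact_mod_cast PySem.Int.floordiv_natCast s.toList.length 2
  rw [hfd]
  constructor
  · rintro ⟨i, hmem, hbody⟩
    obtain ⟨hi1, hi2⟩ := PySem.List.mem_pyRange_one.1 hmem
    have hi0 : i = ((i.toNat : Nat) : Int) := by omega
    rw [hi0] at hbody
    obtain ⟨hd, hc⟩ := (body_iff s.toList i.toNat (by omega)).1 hbody
    exact ⟨i.toNat, by omega, by omega, hd, hc⟩
  · rintro ⟨it, h1, h2, h3, h4⟩
    refine ⟨((it : Nat) : Int), PySem.List.mem_pyRange_one.2
      ⟨by exact_mod_cast h1, by push_cast; omega⟩,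
      (body_iff s.toList it h2).2 ⟨h3, h4⟩⟩

lemma prefix_drop_double (cs : List Char) (k : ℕ) (hk : k ≤ cs.length) :
    cs <+: (cs ++ cs).drop k ↔ cs.rotate k = cs := by
  rw [List.drop_append_of_le_length hk, List.prefix_iff_eq_take,
      List.take_append,
      List.take_of_length_le (by simp),
      List.rotate_eq_drop_append_take hk, List.length_drop]
  have h2 : cs.length - (cs.length - k) = k := by omega
  rw [h2]
  exact eq_comm

lemma alt_iff (s : String) :
    repeated_part2_alt s = true ↔
      ∃ k : ℕ, 1 ≤ k ∧ k < s.toList.length ∧ (s.toList).rotate k = s.toList := by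
  dsimp only [repeated_part2_alt]
  set cs := s.toList with hcs
  rcases Nat.eq_zero_or_pos cs.length with hn | hn
  · simp [hn]
  · have hT : PySem.List.slice (cs ++ cs) (some 1) (some (-1)) =
        ((cs ++ cs).drop 1).take (cs.length + cs.length - 2) := by
      simp [PySem.List.slice]
      rw [min_eq_left (by omega), List.drop_one]
      congr 1
    rw [hT]
    simp only [Bool.and_eq_true, decide_eq_true_eq]
    rw [← PySem.Chars.exists_prefix_drop_iff_isIn]
    constructor
    · rintro ⟨-, j, hj⟩
      rw [List.drop_take, List.drop_drop] at hj
      have hlen : cs.length ≤ cs.length + cs.length - 2 - j := (List.prefix_take_iff.1 hj).2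
      have hj' : cs <+: (cs ++ cs).drop (j + 1) := by
        rw [Nat.add_comm]; exact (List.prefix_take_iff.1 hj).1
      exact ⟨j + 1, by omega, by omega, (prefix_drop_double cs (j + 1) (by omega)).1 hj'⟩
    · rintro ⟨k, hk1, hk2, hrot⟩
      refine ⟨by exact_mod_cast hn, k - 1, ?_⟩
      rw [List.drop_take, List.drop_drop]
      have hk' : 1 + (k - 1) = k := by omega
      rw [hk']
      exact List.prefix_take_iff.2 ⟨(prefix_drop_double cs k (by omega)).2 hrot, by omega⟩

-- ===== VERDICT (by name: the statement is the Claim_ definition above) =====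
theorem repeated_part2_spec : Claim_equal_repeated_part2 := by
  intro s _
  unfold Spec_repeated_part2
  have h : repeated_part2 s = true ↔ repeated_part2_alt s = true := by
    rw [a_iff, alt_iff]
    exact bridge s.toList
  cases hA : repeated_part2 s <;> cases hB : repeated_part2_alt s <;> simp_all
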